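-- pv_equiv track=rewrite | github.com/Vineyardcode/voynich_slop | scripts/phase67_run_length_morphology.py | run_tokenize
-- ===== SOURCE A (Python) =====
-- def run_tokenize(glyphs, targets):
--     """Replace each run of target glyph with a length-coded token.
--     e.g., i→i1, ii→i2, iii→i3 (preserves run length as distinct token)."""
--     result = []
--     i = 0
--     while i < len(glyphs):
--         if glyphs[i] in targets:
--             run_len = 1
--             while i + run_len < len(glyphs) and glyphs[i + run_len] == glyphs[i]:
--                 run_len += 1
--             result.append(f'{glyphs[i]}{run_len}')
--             i += run_len
--         else:
--             result.append(glyphs[i])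
--             i += 1
--     return result
-- ===== SOURCE B (Python) =====
-- def _flush(run, tset, result):
--     ch, n = run
--     if ch in tset:
--         result.append(f'{ch}{n}')
--     else:
--         result.extend([ch] * n)
--
--
-- def run_tokenize(glyphs, targets):
--     """Single pass: fold over glyphs keeping the open run (char, count);
--     flush a run as a length token (targets) or as repeated chars."""
--     tset = set(targets)
--     result = []
--     run = None  # open run as (char, count)
--     for g in glyphs:
--         if run is not None and run[0] == g:
--             run = (g, run[1] + 1)
--         else:
--             if run is not None:
--                 _flush(run, tset, result)
--             run = (g, 1)
--     if run is not None:
--         _flush(run, tset, result)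
--     return result
-- ===== Notes on version B (the rewrite author's own statement) =====
-- stated objective: idiomatic
-- what changed: A's index-based while loop with a nested run-scanning while is replaced by a single left-to-right fold that carries the open run as (char, count) state and flushes each finished run, with targets held in a set.
import Mathlib
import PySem

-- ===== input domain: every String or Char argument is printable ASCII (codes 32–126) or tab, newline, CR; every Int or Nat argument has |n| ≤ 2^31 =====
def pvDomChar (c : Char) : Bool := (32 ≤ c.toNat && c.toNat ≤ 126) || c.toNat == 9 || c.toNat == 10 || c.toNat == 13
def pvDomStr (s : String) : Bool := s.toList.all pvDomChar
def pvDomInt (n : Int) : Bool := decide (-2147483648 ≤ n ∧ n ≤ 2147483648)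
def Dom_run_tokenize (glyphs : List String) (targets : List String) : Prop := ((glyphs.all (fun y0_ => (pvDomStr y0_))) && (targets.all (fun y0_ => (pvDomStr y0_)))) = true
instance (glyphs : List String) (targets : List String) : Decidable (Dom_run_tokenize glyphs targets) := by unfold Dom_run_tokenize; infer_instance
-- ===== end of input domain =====

-- B replaces A's index-based while loop (with its inner run-scanning while) by a single
-- left-to-right fold that carries the open run as (char, count) state — an idiomatic
-- one-pass run-length fold; same asymptotic cost, plainer structure.

-- ===== PORT A =====
-- inner while loop of A: extend run_len while glyphs[i+run_len] == glyphs[i]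
-- (fuel-based recursion for the while loop; fuel = glyphs.length is always enough)
def runLenA (glyphs : List String) (i : Nat) (x : String) : Nat → Nat → Nat
  | 0, r => r
  | fuel + 1, r =>
    if h : i + r < glyphs.length then
      if glyphs[i + r] = x then runLenA glyphs i x fuel (r + 1) else r
    else r

-- outer while loop of A, on the index i
def runA (glyphs : List String) (targets : List String) : Nat → Nat → List String
  | 0, _ => []
  | fuel + 1, i =>
    if h : i < glyphs.length then
      if glyphs[i] ∈ targets then
        (glyphs[i] ++ PySem.Int.toStr ((runLenA glyphs i glyphs[i] glyphs.length 1 : Nat) : Int)) ::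
          runA glyphs targets fuel (i + runLenA glyphs i glyphs[i] glyphs.length 1)
      else
        glyphs[i] :: runA glyphs targets fuel (i + 1)
    else []

def run_tokenize (glyphs : List String) (targets : List String) : List String :=
  runA glyphs targets glyphs.length 0

-- ===== PORT B =====
-- _flush: emit the finished run into result
def flushB (tset : PySem.Set String) (run : String × Nat) (result : List String) : List String :=
  if run.1 ∈ tset then result ++ [run.1 ++ PySem.Int.toStr ((run.2 : Nat) : Int)]
  else result ++ List.replicate run.2 run.1

-- one iteration of B's for loop; state = (result, open run)
def stepB (tset : PySem.Set String) (st : List String × Option (String × Nat)) (g : String) :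
    List String × Option (String × Nat) :=
  match st with
  | (result, some pc) =>
      if pc.1 = g then (result, some (g, pc.2 + 1))
      else (flushB tset pc result, some (g, 1))
  | (result, none) => (result, some (g, 1))

def run_tokenize_alt (glyphs : List String) (targets : List String) : List String :=
  let tset := PySem.Set.ofList targets
  match glyphs.foldl (stepB tset) ([], none) with
  | (result, none) => result
  | (result, some pc) => flushB tset pc result

-- ===== PRECONDITION & SPEC =====
def Spec_run_tokenize (glyphs : List String) (targets : List String) (out : List String) : Prop := out = run_tokenize_alt glyphs targets
instance (glyphs : List String) (targets : List String) (out : List String) : Decidable (Spec_run_tokenize glyphs targets out) := by unfold Spec_run_tokenize; infer_instance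

-- ===== CLAIM (what is proved, stated in full; the proofs are below) =====
def Claim_equal_run_tokenize : Prop := ∀ (glyphs : List String) (targets : List String), Dom_run_tokenize glyphs targets → Spec_run_tokenize glyphs targets (run_tokenize glyphs targets)

-- ===== LEMMAS AND PROOFS =====

-- canonical run-splitting recursion both ports are reduced to
def fR (targets : List String) : List String → List String
  | [] => []
  | g :: rest =>
    if g ∈ targets then
      (g ++ PySem.Int.toStr ((1 + (rest.takeWhile (· == g)).length : Nat) : Int)) ::
        fR targets (rest.dropWhile (· == g))
    else g :: fR targets rest
termination_by l => l.length
decreasing_by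
  · have := List.length_dropWhile_le (· == g) rest; simpa using Nat.lt_succ_of_le this
  · simp

-- the tokens one finished run contributes
def tok (targets : List String) (p : String) (c : Nat) : List String :=
  if p ∈ targets then [p ++ PySem.Int.toStr ((c : Nat) : Int)] else List.replicate c p

theorem drop_takeWhile_length {α : Type} (p : α → Bool) (l : List α) :
    l.drop (l.takeWhile p).length = l.dropWhile p := by
  induction l with
  | nil => simp
  | cons a l ih =>
    by_cases h : p a
    · simp [h, ih]
    · simp [h]

theorem runLenA_eq (glyphs : List String) (i : Nat) (x : String) (fuel r : Nat)
    (hf : glyphs.length ≤ i + r + fuel) :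
    runLenA glyphs i x fuel r = r + ((glyphs.drop (i + r)).takeWhile (· == x)).length := by
  induction fuel generalizing r with
  | zero =>
    rw [runLenA, List.drop_of_length_le (by omega)]
    simp
  | succ fuel ih =>
    rw [runLenA]
    split
    · rename_i h
      rw [List.drop_eq_getElem_cons h, List.takeWhile_cons]
      split
      · rename_i hx
        simp only [hx, beq_self_eq_true, if_pos, List.length_cons]
        have e : i + (r + 1) = i + r + 1 := by omega
        rw [ih (r + 1) (by omega), e]
        omega
      · rename_i hx
        simp [beq_false_of_ne hx]
    · rename_i h
      rw [List.drop_of_length_le (by omega)]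
      simp

theorem runA_eq (glyphs targets : List String) (fuel i : Nat)
    (hf : glyphs.length ≤ i + fuel) :
    runA glyphs targets fuel i = fR targets (glyphs.drop i) := by
  induction fuel generalizing i with
  | zero =>
    rw [runA, List.drop_of_length_le (by omega), fR]
  | succ fuel ih =>
    rw [runA]
    split
    · rename_i h
      rw [List.drop_eq_getElem_cons h]
      split
      · rename_i hmem
        simp only [fR, hmem, if_pos]
        have hr : runLenA glyphs i glyphs[i] glyphs.length 1
            = 1 + ((glyphs.drop (i + 1)).takeWhile (· == glyphs[i])).length :=
          runLenA_eq glyphs i glyphs[i] glyphs.length 1 (by omega)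
        have hfix : glyphs.length ≤ i + runLenA glyphs i glyphs[i] glyphs.length 1 + fuel := by
          have h1 : ((glyphs.drop (i + 1)).takeWhile (· == glyphs[i])).length
              ≤ (glyphs.drop (i + 1)).length := (List.takeWhile_sublist _).length_le
          have h2 : (glyphs.drop (i + 1)).length = glyphs.length - (i + 1) :=
            List.length_drop ..
          omega
        rw [ih _ hfix, hr]
        congr 1
        congr 1
        have e : i + (1 + ((glyphs.drop (i + 1)).takeWhile (· == glyphs[i])).length)
            = (i + 1) + (((glyphs.drop (i + 1)).takeWhile (· == glyphs[i])).length) := by omega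
        rw [e, ← List.drop_drop, drop_takeWhile_length]
      · rename_i hmem
        simp only [fR, hmem, if_neg, not_false_iff]
        rw [ih (i + 1) (by omega)]
    · rename_i h
      rw [List.drop_of_length_le (by omega)]
      rw [fR]

theorem flushB_eq (targets : List String) (p : String) (c : Nat) (result : List String) :
    flushB (PySem.Set.ofList targets) (p, c) result = result ++ tok targets p c := by
  by_cases h : p ∈ targets
  · simp [flushB, tok, PySem.Set.mem_ofList, h]
  · simp [flushB, tok, PySem.Set.mem_ofList, h]

theorem takeWhile_replicate_append (p : String) (c : Nat) (xs : List String) :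
    (List.replicate c p ++ xs).takeWhile (· == p) = List.replicate c p ++ xs.takeWhile (· == p) := by
  induction c with
  | zero => simp
  | succ c ih => simp [List.replicate_succ, ih]

theorem dropWhile_replicate_append (p : String) (c : Nat) (xs : List String) :
    (List.replicate c p ++ xs).dropWhile (· == p) = xs.dropWhile (· == p) := by
  induction c with
  | zero => simp
  | succ c ih => simp [List.replicate_succ, ih]

theorem takeWhile_eq_nil_of_head (p : String) (xs : List String) (hx : xs.head? ≠ some p) :
    xs.takeWhile (· == p) = [] := by
  cases xs with
  | nil => simp
  | cons a l =>
    have : a ≠ p := by simpa using hx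
    simp [this]

theorem dropWhile_eq_self_of_head (p : String) (xs : List String) (hx : xs.head? ≠ some p) :
    xs.dropWhile (· == p) = xs := by
  cases xs with
  | nil => simp
  | cons a l =>
    have : a ≠ p := by simpa using hx
    simp [this]

theorem fR_run (targets : List String) (p : String) (c : Nat) (xs : List String)
    (hx : xs.head? ≠ some p) :
    fR targets (List.replicate (c + 1) p ++ xs) = tok targets p (c + 1) ++ fR targets xs := by
  induction c with
  | zero =>
    have hrep : List.replicate (0 + 1) p ++ xs = p :: xs := by simp
    rw [hrep, fR]
    by_cases h : p ∈ targets
    · simp only [h, if_pos, tok]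
      rw [takeWhile_eq_nil_of_head p xs hx, dropWhile_eq_self_of_head p xs hx]
      simp only [List.length_nil, List.singleton_append]
    · simp [h, tok]
  | succ c ih =>
    have hrep : List.replicate (c + 1 + 1) p ++ xs = p :: (List.replicate (c + 1) p ++ xs) := by
      simp [List.replicate_succ]
    rw [hrep, fR]
    by_cases h : p ∈ targets
    · simp only [h, if_pos]
      rw [takeWhile_replicate_append, takeWhile_eq_nil_of_head p xs hx,
        dropWhile_replicate_append, dropWhile_eq_self_of_head p xs hx]
      simp only [tok, h, if_pos, List.append_nil, List.length_replicate,
        List.singleton_append]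
      have e : 1 + (c + 1) = c + 1 + 1 := by omega
      rw [e]
    · simp only [h, if_neg, not_false_iff]
      rw [ih]
      simp [tok, h, List.replicate_succ]

-- finalization of B's state
def finishB (tset : PySem.Set String) (st : List String × Option (String × Nat)) : List String :=
  match st with
  | (result, none) => result
  | (result, some pc) => flushB tset pc result

theorem foldB_eq (targets : List String) (xs : List String) :
    ∀ (result : List String) (p : String) (c : Nat),
    finishB (PySem.Set.ofList targets) (xs.foldl (stepB (PySem.Set.ofList targets)) (result, some (p, c + 1)))
      = result ++ fR targets (List.replicate (c + 1) p ++ xs) := by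
  induction xs with
  | nil =>
    intro result p c
    simp only [List.foldl_nil, finishB, flushB_eq]
    rw [fR_run targets p c [] (by simp)]
    simp [fR]
  | cons g rest ih =>
    intro result p c
    by_cases h : p = g
    · subst h
      simp only [List.foldl_cons, stepB, if_pos]
      rw [ih result p (c + 1)]
      have e : List.replicate (c + 1) p ++ p :: rest = List.replicate (c + 1 + 1) p ++ rest := by
        simp [List.replicate_succ']
      rw [e]
    · simp only [List.foldl_cons, stepB, h, if_neg, not_false_iff]
      rw [ih (flushB (PySem.Set.ofList targets) (p, c + 1) result) g 0, flushB_eq]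
      rw [fR_run targets p c (g :: rest) (by simpa using fun e => h e.symm)]
      simp

theorem alt_eq_fR (glyphs targets : List String) :
    run_tokenize_alt glyphs targets = fR targets glyphs := by
  cases glyphs with
  | nil => simp [run_tokenize_alt, fR]
  | cons g rest =>
    show finishB (PySem.Set.ofList targets)
        ((g :: rest).foldl (stepB (PySem.Set.ofList targets)) ([], none)) = _
    simp only [List.foldl_cons, stepB]
    rw [foldB_eq targets rest [] g 0]
    simp

-- ===== VERDICT (by name: the statement is the Claim_ definition above) =====
theorem run_tokenize_spec : Claim_equal_run_tokenize := by
  intro glyphs targets _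
  show run_tokenize glyphs targets = run_tokenize_alt glyphs targets
  rw [run_tokenize, runA_eq glyphs targets glyphs.length 0 (by omega), List.drop_zero, alt_eq_fR]
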